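-- pv_equiv track=rewrite | github.com/Javi153/Algebra-Computacional | Ejercicios/Tema 3/ej1.py | div2
-- ===== SOURCE A (Python) =====
-- def remover_ceros(a):             # a = lista de digitos decimales
--     n = len(a)
--     while n >= 1 and a[n-1] == 0:
--         n -= 1
--     del a[n:]
--
-- def div2(x):
--     acarreo = 0
--     for i in range(len(x) - 1, -1, -1):
--         aux = x[i] + acarreo
--         x[i] = aux // 2
--         if aux % 2 == 0:
--             acarreo = 0
--         else:
--             acarreo = 10
--     remover_ceros(x)
--     return x
-- ===== SOURCE B (Python) =====
-- def div2(x):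
--     y, zeros = [], 0
--     for lo, hi in zip(x, x[1:] + [0]):
--         h = lo // 2 + 5 * (hi % 2)
--         if h:
--             y += [0] * zeros + [h]
--             zeros = 0
--         else:
--             zeros += 1
--     x[:] = y
--     return x
-- ===== Notes on version B (the rewrite author's own statement) =====
-- stated objective: simpler
-- what changed: Replaces A's descending indexed loop threading a carry accumulator plus a separate index-counting trim helper by a single forward pass over adjacent digit pairs (zip of the list with its shift) with no carry state, where trailing-zero trimming is fused into construction via a pending-zero-run counter instead of a second trimming pass.
import Mathlib
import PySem

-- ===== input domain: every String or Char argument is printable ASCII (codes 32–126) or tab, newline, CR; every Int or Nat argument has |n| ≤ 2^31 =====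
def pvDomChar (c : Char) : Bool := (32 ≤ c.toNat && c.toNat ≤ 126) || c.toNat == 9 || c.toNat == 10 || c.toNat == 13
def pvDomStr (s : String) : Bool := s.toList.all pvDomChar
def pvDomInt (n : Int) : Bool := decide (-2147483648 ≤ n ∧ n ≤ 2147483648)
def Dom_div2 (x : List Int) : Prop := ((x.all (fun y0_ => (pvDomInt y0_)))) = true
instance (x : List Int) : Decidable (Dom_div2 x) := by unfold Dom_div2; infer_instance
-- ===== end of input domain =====

-- B replaces A's descending carry loop plus a separate trimming helper by one forward pass over
-- adjacent digit pairs with trailing-zero trimming fused in via a pending-zero-run counter;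
-- objective: simpler. Both A and B mutate the argument list in place (x[i] = …, x[:] = …);
-- the equivalence proved here is about the return value.

-- ===== PORT A =====
-- the for-loop over range(len(x)-1, -1, -1): carry flows from the high (last) index down,
-- so the structural recursion processes the tail (higher indices) first; state = (digits, acarreo)
def div2Loop : List Int → Int → (List Int × Int)
  | [], ac => ([], ac)
  | d :: rest, ac =>
      let p := div2Loop rest ac
      let aux := d + p.2
      (PySem.Int.floordiv aux 2 :: p.1, if PySem.Int.mod aux 2 == 0 then 0 else 10)

-- the while-loop of remover_ceros: n counts down while a[n-1] == 0
def removerLoop (a : List Int) : Nat → Nat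
  | 0 => 0
  | n + 1 => if a.getD n 0 == 0 then removerLoop a n else n + 1

def remover_ceros (a : List Int) : List Int := a.take (removerLoop a a.length)

def div2 (x : List Int) : List Int := remover_ceros (div2Loop x 0).1

-- ===== PORT B =====
-- 'zip(x, x[1:] + [0])'
def altPairs (x : List Int) : List (Int × Int) := x.zip (x.drop 1 ++ [0])

-- the loop body of Source B; state = (y, zeros); 'zeros' is Python's nonnegative run counter, kept as Nat
def altStep (s : List Int × Nat) (p : Int × Int) : List Int × Nat :=
  let h := PySem.Int.floordiv p.1 2 + 5 * PySem.Int.mod p.2 2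
  if h ≠ 0 then (s.1 ++ List.replicate s.2 0 ++ [h], 0) else (s.1, s.2 + 1)

def div2_alt (x : List Int) : List Int := ((altPairs x).foldl altStep ([], 0)).1

-- ===== PRECONDITION & SPEC =====
def Spec_div2 (x : List Int) (out : List Int) : Prop := out = div2_alt x
instance (x : List Int) (out : List Int) : Decidable (Spec_div2 x out) := by unfold Spec_div2; infer_instance

-- ===== CLAIM (what is proved, stated in full; the proofs are below) =====
def Claim_equal_div2 : Prop := ∀ (x : List Int), Dom_div2 x → Spec_div2 x (div2 x)

-- ===== LEMMAS AND PROOFS =====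

-- the halved digit Source B computes for one adjacent pair
def pvHalf (p : Int × Int) : Int := PySem.Int.floordiv p.1 2 + 5 * PySem.Int.mod p.2 2

-- canonical trailing-zero trimming, structurally
def pvTrim : List Int → List Int
  | [] => []
  | d :: r => match pvTrim r with
      | [] => if d = 0 then [] else [d]
      | t => d :: t

-- ---- A's trimming equals pvTrim ----

theorem removerLoop_le (a : List Int) (n : Nat) : removerLoop a n ≤ n := by
  induction n with
  | zero => simp [removerLoop]
  | succ m ih => simp only [removerLoop]; split <;> omega

theorem removerLoop_congr (n : Nat) (a b : List Int)
    (h : ∀ i < n, a.getD i 0 = b.getD i 0) : removerLoop a n = removerLoop b n := by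
  induction n with
  | zero => rfl
  | succ m ih =>
      simp only [removerLoop, h m (by omega)]
      split
      · exact ih (fun i hi => h i (by omega))
      · rfl

theorem pvTrim_concat_zero (l : List Int) : pvTrim (l ++ [0]) = pvTrim l := by
  induction l with
  | nil => simp [pvTrim]
  | cons d r ih => simp only [List.cons_append, pvTrim, ih]

theorem pvTrim_concat_ne (l : List Int) (v : Int) (hv : v ≠ 0) : pvTrim (l ++ [v]) = l ++ [v] := by
  induction l with
  | nil => simp [pvTrim, hv]
  | cons d r ih =>
      simp only [List.cons_append, pvTrim, ih]
      cases r <;> simp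

theorem trim_eq (y : List Int) : remover_ceros y = pvTrim y := by
  induction y using List.reverseRecOn with
  | nil => simp [remover_ceros, removerLoop, pvTrim]
  | append_singleton l v ih =>
      by_cases hv : v = 0
      · subst hv
        rw [pvTrim_concat_zero, ← ih]
        unfold remover_ceros
        have hlen : (l ++ [(0:Int)]).length = l.length + 1 := by simp
        rw [hlen]
        have hget : (l ++ [(0:Int)]).getD l.length 0 = 0 := by simp
        simp only [removerLoop, hget, beq_self_eq_true, if_true]
        rw [removerLoop_congr l.length (l ++ [(0:Int)]) l
          (fun i hi => by simp only [List.getD_eq_getElem?_getD, List.getElem?_append_left hi])]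
        exact List.take_append_of_le_length (removerLoop_le l l.length)
      · rw [pvTrim_concat_ne l v hv]
        unfold remover_ceros
        have hlen : (l ++ [v]).length = l.length + 1 := by simp
        rw [hlen]
        have hget : (l ++ [v]).getD l.length 0 = v := by simp
        simp only [removerLoop, hget]
        simp [hv]

-- ---- A's carry loop computes the pairwise halves ----

theorem loop_snd_even (x : List Int) (ac : Int) (h : 2 ∣ ac) : 2 ∣ (div2Loop x ac).2 := by
  cases x with
  | nil => simpa [div2Loop]
  | cons d rest =>
      simp only [div2Loop]
      split <;> decide

theorem loop_snd_zero (x : List Int) : (div2Loop x 0).2 = 10 * PySem.Int.mod (x.getD 0 0) 2 := by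
  cases x with
  | nil => simp [div2Loop, PySem.Int.mod]
  | cons d rest =>
      have hev : 2 ∣ (div2Loop rest 0).2 := loop_snd_even rest 0 (by decide)
      obtain ⟨k, hk⟩ := hev
      simp only [div2Loop, List.getD_cons_zero]
      rw [PySem.Int.mod_eq_emod_of_pos (by norm_num), PySem.Int.mod_eq_emod_of_pos (by norm_num)]
      have h2 : (d + (div2Loop rest 0).2) % 2 = d % 2 := by omega
      rw [h2]
      have : d % 2 = 0 ∨ d % 2 = 1 := by omega
      rcases this with h | h <;> simp [h]

theorem pairs_cons (d : Int) (rest : List Int) :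
    altPairs (d :: rest) = (d, rest.getD 0 0) :: altPairs rest := by
  cases rest <;> simp [altPairs]

theorem loop_fst_eq (x : List Int) : (div2Loop x 0).1 = (altPairs x).map pvHalf := by
  induction x with
  | nil => simp [div2Loop, altPairs]
  | cons d rest ih =>
      rw [pairs_cons]
      simp only [div2Loop, List.map_cons, ih]
      congr 1
      rw [loop_snd_zero rest]
      simp only [pvHalf, PySem.Int.mod_eq_emod_of_pos (b := 2) (by norm_num),
        PySem.Int.floordiv_eq_ediv_of_pos (b := 2) (by norm_num)]
      omega

-- ---- B's fused fold equals pvTrim of the pairwise halves ----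

theorem pvTrim_replicate (z : Nat) : pvTrim (List.replicate z 0) = [] := by
  induction z with
  | zero => simp [pvTrim]
  | succ m ih => simp [List.replicate_succ, pvTrim, ih]

theorem pvTrim_cons_ne (h : Int) (m : List Int) (hh : h ≠ 0) :
    pvTrim (h :: m) = h :: pvTrim m := by
  simp only [pvTrim]
  cases pvTrim m <;> simp [hh]

theorem pvTrim_cons_of_ne_nil (d : Int) (w : List Int) (hw : pvTrim w ≠ []) :
    pvTrim (d :: w) = d :: pvTrim w := by
  cases hpw : pvTrim w with
  | nil => exact absurd hpw hw
  | cons t ts => simp only [pvTrim, hpw]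

theorem pvTrim_append_of_ne_nil (l m : List Int) (hm : pvTrim m ≠ []) :
    pvTrim (l ++ m) = l ++ pvTrim m := by
  induction l with
  | nil => simp
  | cons d r ih =>
      rw [List.cons_append, pvTrim_cons_of_ne_nil d (r ++ m) (by rw [ih]; simp [hm]), ih]
      simp

theorem fold_inv (ps : List (Int × Int)) (y : List Int) (z : Nat) :
    (ps.foldl altStep (y, z)).1 = y ++ pvTrim (List.replicate z 0 ++ ps.map pvHalf) := by
  induction ps generalizing y z with
  | nil => simp [pvTrim_replicate]
  | cons p rest ih =>
      simp only [List.foldl_cons, altStep, List.map_cons]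
      by_cases hh : pvHalf p = 0
      · rw [if_neg (by simpa [pvHalf] using hh), ih]
        have hrep : List.replicate (z + 1) (0 : Int) ++ rest.map pvHalf
            = List.replicate z 0 ++ pvHalf p :: rest.map pvHalf := by
          rw [List.replicate_succ', hh]; simp
        rw [← hrep]
      · rw [if_pos (by simpa [pvHalf] using hh), ih,
          show (PySem.Int.floordiv p.1 2 + 5 * PySem.Int.mod p.2 2) = pvHalf p from rfl]
        simp only [List.replicate_zero, List.nil_append]
        rw [pvTrim_append_of_ne_nil (List.replicate z 0) (pvHalf p :: rest.map pvHalf)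
            (by rw [pvTrim_cons_ne _ _ hh]; simp),
          pvTrim_cons_ne _ _ hh]
        simp

-- ===== VERDICT (by name: the statement is the Claim_ definition above) =====
theorem div2_spec : Claim_equal_div2 := by
  intro x _
  unfold Spec_div2 div2 div2_alt
  rw [trim_eq, loop_fst_eq, fold_inv]
  simp
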